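-- pv_equiv track=rewrite | github.com/YanaCh1513/python-homework | Lesson 4/task2.py | is_poly
-- ===== SOURCE A (Python) =====
-- def is_poly(string):
--     char_dict=dict()
--     for n_elem in string:
--         char_dict[n_elem] = char_dict.get(n_elem, 0) +1
--     odd_variable =0
--     for i_value in char_dict.values():
--         if i_value % 2 != 0:
--            odd_variable += 1
--     return odd_variable >=1
-- ===== SOURCE B (Python) =====
-- def is_poly(string):
--     odd = set()
--     for ch in string:
--         if ch in odd:
--             odd.discard(ch)
--         else:
--             odd.add(ch)
--     return len(odd) >= 1
-- ===== Notes on version B (the rewrite author's own statement) =====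
-- stated objective: idiomatic
-- what changed: Replaces the count-dictionary plus a second scan over its values by a single pass maintaining a parity set (toggle membership per character), returning whether the set is non-empty.
import Mathlib
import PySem

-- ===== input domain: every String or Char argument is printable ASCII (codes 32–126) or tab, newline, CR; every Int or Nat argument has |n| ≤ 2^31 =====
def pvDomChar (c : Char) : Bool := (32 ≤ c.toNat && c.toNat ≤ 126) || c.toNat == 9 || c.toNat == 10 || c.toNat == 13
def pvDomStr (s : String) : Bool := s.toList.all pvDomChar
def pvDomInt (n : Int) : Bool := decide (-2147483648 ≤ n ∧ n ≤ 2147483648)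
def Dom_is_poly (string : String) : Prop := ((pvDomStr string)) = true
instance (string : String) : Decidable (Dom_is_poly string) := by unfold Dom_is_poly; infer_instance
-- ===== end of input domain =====

-- B replaces A's count-dictionary plus second value scan by one parity-set toggle pass (idiomatic).

-- ===== PORT A =====
def is_poly (string : String) : Bool :=
  let char_dict := string.toList.foldl
    (fun d c => d.insert c (d.getD c 0 + 1)) PySem.Dict.empty
  let odd_variable := char_dict.values.foldl
    (fun acc v => if PySem.Int.mod v 2 ≠ 0 then acc + 1 else acc) (0 : Int)
  decide (1 ≤ odd_variable)

-- ===== PORT B =====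
def is_poly_alt (string : String) : Bool :=
  let odd := string.toList.foldl
    (fun s c => if PySem.Set.contains s c then PySem.Set.discard s c else PySem.Set.add s c)
    (PySem.Set.empty : PySem.Set Char)
  decide (1 ≤ PySem.Set.len odd)

-- ===== PRECONDITION & SPEC =====
def Spec_is_poly (string : String) (out : Bool) : Prop := out = is_poly_alt string
instance (string : String) (out : Bool) : Decidable (Spec_is_poly string out) := by unfold Spec_is_poly; infer_instance

-- ===== CLAIM (what is proved, stated in full; the proofs are below) =====
def Claim_equal_is_poly : Prop := ∀ (string : String), Dom_is_poly string → Spec_is_poly string (is_poly string)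

-- ===== LEMMAS AND PROOFS =====

-- B's toggle loop: the result stays Nodup and membership in it is exactly odd count (relative to the start set).
theorem toggle_invariant (l : List Char) (s : PySem.Set Char) (hs : s.Nodup) :
    (l.foldl (fun s c => if PySem.Set.contains s c then PySem.Set.discard s c else PySem.Set.add s c) s).Nodup ∧
    ∀ c, c ∈ l.foldl (fun s c => if PySem.Set.contains s c then PySem.Set.discard s c else PySem.Set.add s c) s ↔
      ((c ∈ s ∧ l.count c % 2 = 0) ∨ (c ∉ s ∧ l.count c % 2 = 1)) := by
  induction l generalizing s with
  | nil => simp [hs]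
  | cons x t ih =>
    simp only [List.foldl_cons]
    by_cases hx : x ∈ s
    · have hc : PySem.Set.contains s x = true := by simpa using hx
      rw [hc, if_pos rfl]
      obtain ⟨hn, hm⟩ := ih (PySem.Set.discard s x) (PySem.Set.nodup_discard s x hs)
      refine ⟨hn, fun c => ?_⟩
      rw [hm c, PySem.Set.mem_discard]
      rcases eq_or_ne c x with rfl | hcx
      · rw [List.count_cons_self]
        constructor
        · intro h
          have hp : t.count c % 2 = 1 := by tauto
          exact Or.inl ⟨hx, by omega⟩
        · intro h
          have hp : (t.count c + 1) % 2 = 0 := by tauto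
          exact Or.inr ⟨by simp, by omega⟩
      · rw [List.count_cons_of_ne (Ne.symm hcx)]
        constructor
        · rintro (⟨⟨h1, _⟩, h2⟩ | ⟨h1, h2⟩)
          · exact Or.inl ⟨h1, h2⟩
          · exact Or.inr ⟨fun hm' => h1 ⟨hm', hcx⟩, h2⟩
        · rintro (⟨h1, h2⟩ | ⟨h1, h2⟩)
          · exact Or.inl ⟨⟨h1, hcx⟩, h2⟩
          · exact Or.inr ⟨fun ⟨hm', _⟩ => h1 hm', h2⟩
    · have hc : PySem.Set.contains s x = false := by simpa using hx
      rw [hc]; simp only [Bool.false_eq_true, if_false]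
      obtain ⟨hn, hm⟩ := ih (PySem.Set.add s x) (PySem.Set.nodup_add s x hs)
      refine ⟨hn, fun c => ?_⟩
      rw [hm c, PySem.Set.mem_add]
      rcases eq_or_ne c x with rfl | hcx
      · rw [List.count_cons_self]
        constructor
        · intro h
          have hp : t.count c % 2 = 0 := by tauto
          exact Or.inr ⟨hx, by omega⟩
        · intro h
          have hp : (t.count c + 1) % 2 = 1 := by tauto
          exact Or.inl ⟨Or.inr rfl, by omega⟩
      · rw [List.count_cons_of_ne (Ne.symm hcx)]
        constructor
        · rintro (⟨h1 | h1, h2⟩ | ⟨h1, h2⟩)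
          · exact Or.inl ⟨h1, h2⟩
          · exact absurd h1 hcx
          · exact Or.inr ⟨fun hm' => h1 (Or.inl hm'), h2⟩
        · rintro (⟨h1, h2⟩ | ⟨h1, h2⟩)
          · exact Or.inl ⟨Or.inl h1, h2⟩
          · exact Or.inr ⟨fun hm' => hm'.elim h1 hcx, h2⟩

-- A's value as a predicate over the character list
theorem isPoly_char (s : String) :
    is_poly s = decide (∃ c, c ∈ s.toList ∧ s.toList.count c % 2 = 1) := by
  unfold is_poly
  simp only [PySem.Dict.foldl_insert_getD_add_one_eq_counter]
  have hvals : (PySem.Dict.counter s.toList).values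
      = (PySem.Set.ofList s.toList).map (fun k => (s.toList.count k : Int)) := by
    simp [PySem.Dict.values, PySem.Dict.items_counter]
  simp only [hvals, PySem.List.foldl_ite_add_one, zero_add, decide_eq_decide]
  rw [List.countP_map]
  constructor
  · intro h
    have hpos : 0 < (PySem.Set.ofList s.toList).countP
        (fun k => decide (PySem.Int.mod (s.toList.count k : Int) 2 ≠ 0)) := by
      exact_mod_cast h
    obtain ⟨c, hc, hp⟩ := List.countP_pos_iff.mp hpos
    refine ⟨c, (by simpa using hc), ?_⟩
    have hmod : PySem.Int.mod ((s.toList.count c : Nat) : Int) 2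
        = ((s.toList.count c % 2 : Nat) : Int) := by
      exact_mod_cast PySem.Int.mod_natCast (s.toList.count c) 2
    simp only [decide_eq_true_eq, hmod] at hp
    omega
  · rintro ⟨c, hc, hp⟩
    have hpos : 0 < (PySem.Set.ofList s.toList).countP
        (fun k => decide (PySem.Int.mod (s.toList.count k : Int) 2 ≠ 0)) := by
      refine List.countP_pos_iff.mpr ⟨c, (by simpa using hc), ?_⟩
      have hmod : PySem.Int.mod ((s.toList.count c : Nat) : Int) 2
          = ((s.toList.count c % 2 : Nat) : Int) := by
        exact_mod_cast PySem.Int.mod_natCast (s.toList.count c) 2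
      simp only [decide_eq_true_eq, hmod]
      omega
    exact_mod_cast hpos

-- B's value as the same predicate
theorem isPolyAlt_char (s : String) :
    is_poly_alt s = decide (∃ c, c ∈ s.toList ∧ s.toList.count c % 2 = 1) := by
  unfold is_poly_alt
  obtain ⟨hn, hm⟩ := toggle_invariant s.toList PySem.Set.empty List.nodup_nil
  set odd := s.toList.foldl
    (fun t c => if PySem.Set.contains t c then PySem.Set.discard t c else PySem.Set.add t c)
    (PySem.Set.empty : PySem.Set Char) with hodd
  simp only [decide_eq_decide]
  constructor
  · intro h
    have : odd ≠ [] := by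
      intro he
      rw [he] at h
      simp [PySem.Set.len] at h
    obtain ⟨c, hc⟩ := List.exists_mem_of_ne_nil odd this
    have := (hm c).mp hc
    simp only [PySem.Set.empty, List.not_mem_nil, false_and, false_or, not_false_iff, true_and] at this
    exact ⟨c, List.count_pos_iff.mp (by omega), this⟩
  · rintro ⟨c, _, hp⟩
    have hc : c ∈ odd := (hm c).mpr (Or.inr ⟨by simp [PySem.Set.empty], hp⟩)
    have : odd ≠ [] := List.ne_nil_of_mem hc
    have hlen : 0 < odd.length := List.length_pos_iff.mpr this
    simp only [PySem.Set.len]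
    omega

-- ===== VERDICT (by name: the statement is the Claim_ definition above) =====
theorem is_poly_spec : Claim_equal_is_poly := by
  intro string _
  unfold Spec_is_poly
  rw [isPoly_char, isPolyAlt_char]
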